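-- pv_equiv track=rewrite | github.com/lean-accelerate-consultancy/lac-repo-swarm | src/investigator/core/static_analyzers/terraform_parser.py | _categorize_resource
-- ===== SOURCE A (Python) =====
-- AWS_SERVICE_CATEGORIES = {
--     "aws_vpc": "Networking",
--     "aws_subnet": "Networking",
--     "aws_route_table": "Networking",
--     "aws_route": "Networking",
--     "aws_internet_gateway": "Networking",
--     "aws_nat_gateway": "Networking",
--     "aws_network": "Networking",
--     "aws_eip": "Networking",
--     "aws_security_group": "Security",
--     "aws_iam": "IAM",
--     "aws_emr": "Compute/EMR",
--     "aws_instance": "Compute/EC2",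
--     "aws_launch": "Compute/EC2",
--     "aws_autoscaling": "Compute/EC2",
--     "aws_ecs": "Compute/ECS",
--     "aws_eks": "Compute/EKS",
--     "aws_lambda": "Compute/Lambda",
--     "aws_s3": "Storage/S3",
--     "aws_dynamodb": "Database/DynamoDB",
--     "aws_rds": "Database/RDS",
--     "aws_elasticache": "Database/ElastiCache",
--     "aws_redshift": "Database/Redshift",
--     "aws_sqs": "Messaging/SQS",
--     "aws_sns": "Messaging/SNS",
--     "aws_cloudwatch": "Monitoring",
--     "aws_cloudformation": "CloudFormation",
--     "aws_api_gateway": "API Gateway",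
--     "aws_apigatewayv2": "API Gateway",
--     "aws_lb": "Load Balancing",
--     "aws_alb": "Load Balancing",
--     "aws_elb": "Load Balancing",
--     "aws_cloudfront": "CDN",
--     "aws_route53": "DNS",
--     "aws_acm": "Certificates",
--     "aws_kms": "Encryption",
--     "aws_secretsmanager": "Secrets",
--     "aws_ssm": "Systems Manager",
--     "aws_codepipeline": "CI/CD",
--     "aws_codebuild": "CI/CD",
--     "aws_codecommit": "CI/CD",
--     "aws_codedeploy": "CI/CD",
--     "aws_ecr": "Container Registry",
--     "aws_kinesis": "Streaming",
--     "aws_sagemaker": "ML/SageMaker",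
--     "aws_glue": "ETL/Glue",
--     "aws_athena": "Analytics/Athena",
--     "aws_elasticsearch": "Search",
--     "aws_opensearch": "Search",
--     "aws_waf": "Security/WAF",
--     "aws_config": "Compliance",
--     "aws_guardduty": "Security",
--     "aws_macie": "Security",
-- }
--
-- OTHER_CATEGORIES = {
--     "azurerm_": "Azure",
--     "google_": "GCP",
--     "kubernetes_": "Kubernetes",
--     "helm_": "Helm",
--     "docker_": "Docker",
--     "null_": "Utility",
--     "local_": "Utility",
--     "random_": "Utility",
--     "template_": "Utility",
--     "tls_": "Security/TLS",
--     "archive_": "Utility",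
-- }
--
-- def _categorize_resource(resource_type: str) -> str:
--     """Map a resource type to a service category."""
--     # Check AWS categories (match longest prefix first)
--     for prefix, category in sorted(AWS_SERVICE_CATEGORIES.items(), key=lambda x: -len(x[0])):
--         if resource_type.startswith(prefix):
--             return category
--     # Check other providers
--     for prefix, category in OTHER_CATEGORIES.items():
--         if resource_type.startswith(prefix):
--             return category
--     return "Other"
-- ===== SOURCE B (Python) =====
-- # Category -> prefixes table (same mapping as A's two dicts, grouped by category;
-- # AWS and other-provider prefixes are mutually non-overlapping, so grouping is safe).
-- _CATEGORY_PREFIXES = [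
--     ("Networking", ["aws_vpc", "aws_subnet", "aws_route_table", "aws_route",
--                     "aws_internet_gateway", "aws_nat_gateway", "aws_network", "aws_eip"]),
--     ("Security", ["aws_security_group", "aws_guardduty", "aws_macie"]),
--     ("IAM", ["aws_iam"]),
--     ("Compute/EMR", ["aws_emr"]),
--     ("Compute/EC2", ["aws_instance", "aws_launch", "aws_autoscaling"]),
--     ("Compute/ECS", ["aws_ecs"]),
--     ("Compute/EKS", ["aws_eks"]),
--     ("Compute/Lambda", ["aws_lambda"]),
--     ("Storage/S3", ["aws_s3"]),
--     ("Database/DynamoDB", ["aws_dynamodb"]),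
--     ("Database/RDS", ["aws_rds"]),
--     ("Database/ElastiCache", ["aws_elasticache"]),
--     ("Database/Redshift", ["aws_redshift"]),
--     ("Messaging/SQS", ["aws_sqs"]),
--     ("Messaging/SNS", ["aws_sns"]),
--     ("Monitoring", ["aws_cloudwatch"]),
--     ("CloudFormation", ["aws_cloudformation"]),
--     ("API Gateway", ["aws_api_gateway", "aws_apigatewayv2"]),
--     ("Load Balancing", ["aws_lb", "aws_alb", "aws_elb"]),
--     ("CDN", ["aws_cloudfront"]),
--     ("DNS", ["aws_route53"]),
--     ("Certificates", ["aws_acm"]),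
--     ("Encryption", ["aws_kms"]),
--     ("Secrets", ["aws_secretsmanager"]),
--     ("Systems Manager", ["aws_ssm"]),
--     ("CI/CD", ["aws_codepipeline", "aws_codebuild", "aws_codecommit", "aws_codedeploy"]),
--     ("Container Registry", ["aws_ecr"]),
--     ("Streaming", ["aws_kinesis"]),
--     ("ML/SageMaker", ["aws_sagemaker"]),
--     ("ETL/Glue", ["aws_glue"]),
--     ("Analytics/Athena", ["aws_athena"]),
--     ("Search", ["aws_elasticsearch", "aws_opensearch"]),
--     ("Security/WAF", ["aws_waf"]),
--     ("Compliance", ["aws_config"]),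
--     ("Azure", ["azurerm_"]),
--     ("GCP", ["google_"]),
--     ("Kubernetes", ["kubernetes_"]),
--     ("Helm", ["helm_"]),
--     ("Docker", ["docker_"]),
--     ("Utility", ["null_", "local_", "random_", "template_", "archive_"]),
--     ("Security/TLS", ["tls_"]),
-- ]
--
--
-- def _categorize_resource(resource_type: str) -> str:
--     """Longest-prefix match: try each leading slice of the input, longest first."""
--     for end in range(len(resource_type), 0, -1):
--         candidate = resource_type[:end]
--         for category, prefixes in _CATEGORY_PREFIXES:
--             if candidate in prefixes:
--                 return category
--     return "Other"
-- ===== Notes on version B (the rewrite author's own statement) =====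
-- stated objective: alternative
-- what changed: Instead of sorting the AWS table per call and scanning the two prefix tables with early returns, B inverts the data (a category -> prefix-list table built once) and inverts the loop: it walks the leading slices of the input from longest to shortest and returns the category of the first slice found in the table, which is the longest-prefix match; AWS/other prefixes are mutually non-overlapping so this equals A's choice.
import Mathlib
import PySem

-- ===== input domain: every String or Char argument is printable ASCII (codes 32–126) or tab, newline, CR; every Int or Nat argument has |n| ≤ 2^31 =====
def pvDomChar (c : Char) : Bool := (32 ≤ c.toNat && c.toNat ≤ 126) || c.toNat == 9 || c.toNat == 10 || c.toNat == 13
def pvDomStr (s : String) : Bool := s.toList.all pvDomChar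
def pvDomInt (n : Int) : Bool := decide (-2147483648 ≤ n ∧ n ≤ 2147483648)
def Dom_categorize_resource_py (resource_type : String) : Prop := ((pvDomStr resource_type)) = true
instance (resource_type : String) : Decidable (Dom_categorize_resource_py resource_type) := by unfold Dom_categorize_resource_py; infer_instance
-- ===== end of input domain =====

-- B replaces A's per-call sort plus two early-return table scans by the inverse loop:
-- it walks the leading slices of the INPUT, longest first, and looks each one up in a
-- category -> prefix-list table; same return value everywhere (objective: alternative).

-- ===== PORT A =====
-- AWS_SERVICE_CATEGORIES as an association list in insertion order
def awsItems : List (String × String) :=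
  [("aws_vpc", "Networking"), ("aws_subnet", "Networking"), ("aws_route_table", "Networking"),
   ("aws_route", "Networking"), ("aws_internet_gateway", "Networking"), ("aws_nat_gateway", "Networking"),
   ("aws_network", "Networking"), ("aws_eip", "Networking"), ("aws_security_group", "Security"),
   ("aws_iam", "IAM"), ("aws_emr", "Compute/EMR"), ("aws_instance", "Compute/EC2"),
   ("aws_launch", "Compute/EC2"), ("aws_autoscaling", "Compute/EC2"), ("aws_ecs", "Compute/ECS"),
   ("aws_eks", "Compute/EKS"), ("aws_lambda", "Compute/Lambda"), ("aws_s3", "Storage/S3"),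
   ("aws_dynamodb", "Database/DynamoDB"), ("aws_rds", "Database/RDS"),
   ("aws_elasticache", "Database/ElastiCache"), ("aws_redshift", "Database/Redshift"),
   ("aws_sqs", "Messaging/SQS"), ("aws_sns", "Messaging/SNS"), ("aws_cloudwatch", "Monitoring"),
   ("aws_cloudformation", "CloudFormation"), ("aws_api_gateway", "API Gateway"),
   ("aws_apigatewayv2", "API Gateway"), ("aws_lb", "Load Balancing"), ("aws_alb", "Load Balancing"),
   ("aws_elb", "Load Balancing"), ("aws_cloudfront", "CDN"), ("aws_route53", "DNS"),
   ("aws_acm", "Certificates"), ("aws_kms", "Encryption"), ("aws_secretsmanager", "Secrets"),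
   ("aws_ssm", "Systems Manager"), ("aws_codepipeline", "CI/CD"), ("aws_codebuild", "CI/CD"),
   ("aws_codecommit", "CI/CD"), ("aws_codedeploy", "CI/CD"), ("aws_ecr", "Container Registry"),
   ("aws_kinesis", "Streaming"), ("aws_sagemaker", "ML/SageMaker"), ("aws_glue", "ETL/Glue"),
   ("aws_athena", "Analytics/Athena"), ("aws_elasticsearch", "Search"), ("aws_opensearch", "Search"),
   ("aws_waf", "Security/WAF"), ("aws_config", "Compliance"), ("aws_guardduty", "Security"),
   ("aws_macie", "Security")]

-- OTHER_CATEGORIES as an association list in insertion order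
def otherItems : List (String × String) :=
  [("azurerm_", "Azure"), ("google_", "GCP"), ("kubernetes_", "Kubernetes"), ("helm_", "Helm"),
   ("docker_", "Docker"), ("null_", "Utility"), ("local_", "Utility"), ("random_", "Utility"),
   ("template_", "Utility"), ("tls_", "Security/TLS"), ("archive_", "Utility")]

-- A's for-loop with early return over a (prefix, category) list
def catLoop (resource_type : String) : List (String × String) → Option String
  | [] => none
  | (p, c) :: rest =>
      if PySem.Str.startswith resource_type p then some c else catLoop resource_type rest

def categorize_resource_py (resource_type : String) : String :=
  -- sorted(AWS_SERVICE_CATEGORIES.items(), key=lambda x: -len(x[0])), scanned for the first match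
  match catLoop resource_type
      (PySem.List.sorted awsItems (fun x => -(PySem.Str.len x.1 : Int)) false) with
  | some c => c
  | none =>
      match catLoop resource_type otherItems with
      | some c => c
      | none => "Other"

-- ===== PORT B =====
-- _CATEGORY_PREFIXES: category -> list of prefixes, built once at module load
def catGroups : List (String × List String) :=
  [("Networking", ["aws_vpc", "aws_subnet", "aws_route_table", "aws_route",
                   "aws_internet_gateway", "aws_nat_gateway", "aws_network", "aws_eip"]),
   ("Security", ["aws_security_group", "aws_guardduty", "aws_macie"]),
   ("IAM", ["aws_iam"]),
   ("Compute/EMR", ["aws_emr"]),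
   ("Compute/EC2", ["aws_instance", "aws_launch", "aws_autoscaling"]),
   ("Compute/ECS", ["aws_ecs"]),
   ("Compute/EKS", ["aws_eks"]),
   ("Compute/Lambda", ["aws_lambda"]),
   ("Storage/S3", ["aws_s3"]),
   ("Database/DynamoDB", ["aws_dynamodb"]),
   ("Database/RDS", ["aws_rds"]),
   ("Database/ElastiCache", ["aws_elasticache"]),
   ("Database/Redshift", ["aws_redshift"]),
   ("Messaging/SQS", ["aws_sqs"]),
   ("Messaging/SNS", ["aws_sns"]),
   ("Monitoring", ["aws_cloudwatch"]),
   ("CloudFormation", ["aws_cloudformation"]),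
   ("API Gateway", ["aws_api_gateway", "aws_apigatewayv2"]),
   ("Load Balancing", ["aws_lb", "aws_alb", "aws_elb"]),
   ("CDN", ["aws_cloudfront"]),
   ("DNS", ["aws_route53"]),
   ("Certificates", ["aws_acm"]),
   ("Encryption", ["aws_kms"]),
   ("Secrets", ["aws_secretsmanager"]),
   ("Systems Manager", ["aws_ssm"]),
   ("CI/CD", ["aws_codepipeline", "aws_codebuild", "aws_codecommit", "aws_codedeploy"]),
   ("Container Registry", ["aws_ecr"]),
   ("Streaming", ["aws_kinesis"]),
   ("ML/SageMaker", ["aws_sagemaker"]),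
   ("ETL/Glue", ["aws_glue"]),
   ("Analytics/Athena", ["aws_athena"]),
   ("Search", ["aws_elasticsearch", "aws_opensearch"]),
   ("Security/WAF", ["aws_waf"]),
   ("Compliance", ["aws_config"]),
   ("Azure", ["azurerm_"]),
   ("GCP", ["google_"]),
   ("Kubernetes", ["kubernetes_"]),
   ("Helm", ["helm_"]),
   ("Docker", ["docker_"]),
   ("Utility", ["null_", "local_", "random_", "template_", "archive_"]),
   ("Security/TLS", ["tls_"])]

-- B's inner loop: 'for category, prefixes in _CATEGORY_PREFIXES: if candidate in prefixes: return category'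
def groupFind (candidate : String) : List (String × List String) → Option String
  | [] => none
  | (category, prefixes) :: rest =>
      if prefixes.contains candidate then some category else groupFind candidate rest

-- B's outer loop: 'for end in range(len(resource_type), 0, -1)' trying candidate = resource_type[:end];
-- the slice resource_type[:end] with 0 ≤ end ≤ len is exactly take of the character list
def candLoop (resource_type : String) : Nat → Option String
  | 0 => none
  | n + 1 =>
      match groupFind (String.ofList (resource_type.toList.take (n + 1))) catGroups with
      | some c => some c
      | none => candLoop resource_type n

def categorize_resource_py_alt (resource_type : String) : String :=
  -- range(len(resource_type), 0, -1): len(resource_type) ≥ 0, so .toNat is exact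
  match candLoop resource_type (PySem.Str.len resource_type).toNat with
  | some c => c
  | none => "Other"

-- ===== PRECONDITION & SPEC =====
def Spec_categorize_resource_py (resource_type : String) (out : String) : Prop := out = categorize_resource_py_alt resource_type
instance (resource_type : String) (out : String) : Decidable (Spec_categorize_resource_py resource_type out) := by unfold Spec_categorize_resource_py; infer_instance

-- ===== CLAIM (what is proved, stated in full; the proofs are below) =====
def Claim_equal_categorize_resource_py : Prop := ∀ (resource_type : String), Dom_categorize_resource_py resource_type → Spec_categorize_resource_py resource_type (categorize_resource_py resource_type)

-- ===== LEMMAS AND PROOFS =====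

-- the two prefix tables of A, concatenated (proof-side view of the mapping)
def pvAll : List (String × String) := awsItems ++ otherItems

-- B's grouped table flattened back to (prefix, category) pairs (proof-side view)
def pvPairs : List (String × String) :=
  catGroups.flatMap (fun g => g.2.map (fun k => (k, g.1)))

-- PySem.Str.len is the length of the character list
theorem strlen_toList (s : String) : PySem.Str.len s = (s.toList.length : Int) := by
  simp [pysem]

theorem strlen_toNat (s : String) : (PySem.Str.len s).toNat = s.toList.length := by
  rw [strlen_toList]; exact Int.toNat_natCast _

theorem sw_iff (s k : String) :
    PySem.Str.startswith s k = true ↔ k.toList <+: s.toList := by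
  simp [PySem.Str.startswith_eq, PySem.Chars.startswith_iff]

-- two prefixes matching the same string are comparable
theorem sw_comparable (s p q : String)
    (hp : PySem.Str.startswith s p = true) (hq : PySem.Str.startswith s q = true) :
    p.toList <+: q.toList ∨ q.toList <+: p.toList :=
  List.prefix_or_prefix_of_prefix ((sw_iff s p).mp hp) ((sw_iff s q).mp hq)

-- comparable strings of equal length are equal
theorem eq_of_comparable_len {p q : String}
    (h : p.toList <+: q.toList ∨ q.toList <+: p.toList)
    (hl : p.toList.length = q.toList.length) : p = q := by
  rw [← String.toList_inj]
  rcases h with h | h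
  · exact h.eq_of_length hl
  · exact (h.eq_of_length hl.symm).symm

-- the 64 prefixes are pairwise distinct in A's tables …
theorem keysDistinctAll : List.Pairwise (fun a b => a.1 ≠ b.1) pvAll := by decide

-- … and in B's flattened table
theorem keysDistinctPairs : List.Pairwise (fun a b => a.1 ≠ b.1) pvPairs := by decide

-- the two tables carry the same (prefix, category) pairs
theorem pairs_sub_all : ∀ q ∈ pvPairs, q ∈ pvAll := by decide
theorem all_sub_pairs : ∀ q ∈ pvAll, q ∈ pvPairs := by decide

-- every prefix is nonempty
theorem keys_nonempty : ∀ q ∈ pvAll, 1 ≤ q.1.toList.length := by decide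

-- no AWS prefix is comparable with an other-provider prefix
theorem crossIncomp : ∀ p ∈ awsItems, ∀ q ∈ otherItems,
    ¬(p.1.toList <+: q.1.toList) ∧ ¬(q.1.toList <+: p.1.toList) := by decide

-- the other-provider prefixes are pairwise incomparable
theorem otherIncomp : List.Pairwise
    (fun a b => ¬(a.1.toList <+: b.1.toList) ∧ ¬(b.1.toList <+: a.1.toList)) otherItems := by decide

theorem key_inj {p q : String × String} (hp : p ∈ pvAll) (hq : q ∈ pvAll)
    (h : p.1 = q.1) : p = q := by
  by_cases hpq : p = q
  · exact hpq
  · exact absurd h (List.Pairwise.forall (fun _ _ hxy => Ne.symm hxy) keysDistinctAll hp hq hpq)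

-- a nonempty set of matches has a longest one
theorem exists_max_match (s : String) (l : List (String × String))
    (h : ∃ p ∈ l, PySem.Str.startswith s p.1 = true) :
    ∃ p ∈ l, PySem.Str.startswith s p.1 = true ∧
      ∀ q ∈ l, PySem.Str.startswith s q.1 = true → q.1.toList.length ≤ p.1.toList.length := by
  induction l with
  | nil => simp at h
  | cons a t ih =>
    by_cases hat : ∃ p ∈ t, PySem.Str.startswith s p.1 = true
    · obtain ⟨p, hpt, hpm, hmax⟩ := ih hat
      by_cases ha : PySem.Str.startswith s a.1 = true
      · by_cases hle : a.1.toList.length ≤ p.1.toList.length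
        · refine ⟨p, List.mem_cons_of_mem _ hpt, hpm, ?_⟩
          intro q hq hqm
          rcases List.mem_cons.mp hq with rfl | hq'
          · exact hle
          · exact hmax q hq' hqm
        · refine ⟨a, List.mem_cons_self .., ha, ?_⟩
          intro q hq hqm
          rcases List.mem_cons.mp hq with rfl | hq'
          · exact le_refl _
          · exact le_trans (hmax q hq' hqm) (not_le.mp hle).le
      · refine ⟨p, List.mem_cons_of_mem _ hpt, hpm, ?_⟩
        intro q hq hqm
        rcases List.mem_cons.mp hq with rfl | hq'
        · exact absurd hqm ha
        · exact hmax q hq' hqm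
    · obtain ⟨p, hpl, hpm⟩ := h
      rcases List.mem_cons.mp hpl with rfl | hpt
      · refine ⟨p, List.mem_cons_self .., hpm, ?_⟩
        intro q hq hqm
        rcases List.mem_cons.mp hq with rfl | hq'
        · exact le_refl _
        · exact absurd ⟨q, hq', hqm⟩ hat
      · exact absurd ⟨p, hpt, hpm⟩ hat

-- ===== A-side loop lemmas =====

theorem catLoop_none (s : String) (l : List (String × String))
    (h : ∀ q ∈ l, ¬ PySem.Str.startswith s q.1 = true) : catLoop s l = none := by
  induction l with
  | nil => rfl
  | cons a t ih =>
    obtain ⟨ap, ac⟩ := a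
    simp only [catLoop]
    rw [if_neg (h (ap, ac) (List.mem_cons_self ..))]
    exact ih (fun q hq => h q (List.mem_cons_of_mem _ hq))

-- in a length-nonincreasing list, the first match is the unique longest match
theorem catLoop_max (s : String) (l : List (String × String)) (p : String × String)
    (hp : p ∈ l) (hm : PySem.Str.startswith s p.1 = true)
    (hsort : List.Pairwise (fun a b => b.1.toList.length ≤ a.1.toList.length) l)
    (hu : ∀ q ∈ l, PySem.Str.startswith s q.1 = true →
           q = p ∨ q.1.toList.length < p.1.toList.length) :
    catLoop s l = some p.2 := by
  induction l with
  | nil => cases hp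
  | cons a t ih =>
    obtain ⟨hat, hts⟩ := List.pairwise_cons.mp hsort
    obtain ⟨ap, ac⟩ := a
    by_cases ha : PySem.Str.startswith s ap = true
    · have hap : (ap, ac) = p := by
        rcases hu (ap, ac) (List.mem_cons_self ..) ha with h | h
        · exact h
        · rcases List.mem_cons.mp hp with rfl | hpt
          · exact absurd h (lt_irrefl _)
          · exact absurd h (not_lt.mpr (hat p hpt))
      simp only [catLoop]
      rw [if_pos ha, ← hap]
    · have hpt : p ∈ t := by
        rcases List.mem_cons.mp hp with rfl | hpt
        · exact absurd hm ha
        · exact hpt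
      simp only [catLoop]
      rw [if_neg ha]
      exact ih hpt hts (fun q hq hqm => hu q (List.mem_cons_of_mem _ hq) hqm)

-- in a list with a unique match, the first match is it
theorem catLoop_first (s : String) (l : List (String × String)) (p : String × String)
    (hp : p ∈ l) (hm : PySem.Str.startswith s p.1 = true)
    (hu : ∀ q ∈ l, PySem.Str.startswith s q.1 = true → q = p) :
    catLoop s l = some p.2 := by
  induction l with
  | nil => cases hp
  | cons a t ih =>
    obtain ⟨ap, ac⟩ := a
    by_cases ha : PySem.Str.startswith s ap = true
    · have hap : (ap, ac) = p := hu (ap, ac) (List.mem_cons_self ..) ha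
      simp only [catLoop]
      rw [if_pos ha, ← hap]
    · have hpt : p ∈ t := by
        rcases List.mem_cons.mp hp with rfl | h
        · exact absurd hm ha
        · exact h
      simp only [catLoop]
      rw [if_neg ha]
      exact ih hpt (fun q hq hqm => hu q (List.mem_cons_of_mem _ hq) hqm)

-- ===== B-side loop lemmas =====

-- a groupFind hit is a pair of the flattened table
theorem groupFind_mem (k : String) (G : List (String × List String)) (c : String)
    (h : groupFind k G = some c) :
    (k, c) ∈ G.flatMap (fun g => g.2.map (fun p => (p, g.1))) := by
  induction G with
  | nil => simp [groupFind] at h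
  | cons g t ih =>
    obtain ⟨cat, ks⟩ := g
    simp only [groupFind] at h
    by_cases hk : ks.contains k = true
    · rw [if_pos hk] at h
      cases h
      simp only [List.flatMap_cons, List.mem_append]
      exact Or.inl (List.mem_map.mpr ⟨k, List.contains_iff_mem.mp hk, rfl⟩)
    · rw [if_neg hk] at h
      simp only [List.flatMap_cons, List.mem_append]
      exact Or.inr (ih h)

-- a groupFind miss means the key is in no pair of the flattened table
theorem groupFind_none (k : String) (G : List (String × List String))
    (h : groupFind k G = none) (c : String) :
    (k, c) ∉ G.flatMap (fun g => g.2.map (fun p => (p, g.1))) := by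
  induction G with
  | nil => simp
  | cons g t ih =>
    obtain ⟨cat, ks⟩ := g
    simp only [groupFind] at h
    by_cases hk : ks.contains k = true
    · rw [if_pos hk] at h; cases h
    · rw [if_neg hk] at h
      simp only [List.flatMap_cons, List.mem_append, List.mem_map]
      rintro (⟨p, hpks, heq⟩ | hmem)
      · injection heq with h1 _
        exact hk (List.contains_iff_mem.mpr (h1 ▸ hpks))
      · exact ih h hmem

-- a pair of pvPairs is found by groupFind (keys are unique)
theorem groupFind_of_mem (p : String × String) (hp : p ∈ pvPairs) :
    groupFind p.1 catGroups = some p.2 := by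
  cases h : groupFind p.1 catGroups with
  | none => exact absurd hp (groupFind_none p.1 catGroups h p.2)
  | some c =>
    have hc : (p.1, c) ∈ pvPairs := groupFind_mem p.1 catGroups c h
    by_cases hpc : (p.1, c) = p
    · rw [← hpc]
    · have hne : (p.1, c).1 ≠ p.1 :=
        List.Pairwise.forall (fun _ _ hxy => Ne.symm hxy) keysDistinctPairs hc hp hpc
      exact absurd rfl hne

-- a leading slice of s is a prefix of s
theorem startswith_take (s : String) (m : Nat) :
    PySem.Str.startswith s (String.ofList (s.toList.take m)) = true := by
  rw [sw_iff]
  simpa using List.take_prefix m s.toList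

-- a matching table key of length m IS the leading slice of length m
theorem take_of_match (s : String) (k : String)
    (hsw : PySem.Str.startswith s k = true) :
    String.ofList (s.toList.take k.toList.length) = k := by
  rw [← List.prefix_iff_eq_take.mp ((sw_iff s k).mp hsw)]
  simp

-- groupFind misses the slice of length m when no table key of length m matches s
theorem groupFind_take_none (s : String) (m : Nat) (hm : m ≤ s.toList.length)
    (h : ∀ q ∈ pvAll, PySem.Str.startswith s q.1 = true → q.1.toList.length ≠ m) :
    groupFind (String.ofList (s.toList.take m)) catGroups = none := by
  cases hg : groupFind (String.ofList (s.toList.take m)) catGroups with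
  | none => rfl
  | some c =>
    have hmem : (String.ofList (s.toList.take m), c) ∈ pvAll :=
      pairs_sub_all _ (groupFind_mem _ catGroups c hg)
    have hsw := startswith_take s m
    have hlen : (String.ofList (s.toList.take m)).toList.length = m := by
      simpa using Nat.min_eq_left hm
    exact absurd hlen (h _ hmem hsw)

-- candLoop returns none when every match is longer than n
theorem candLoop_eq_none (s : String) (n : Nat) (hn : n ≤ s.toList.length)
    (h : ∀ q ∈ pvAll, PySem.Str.startswith s q.1 = true → n < q.1.toList.length) :
    candLoop s n = none := by
  induction n with
  | zero => rfl
  | succ m ih =>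
    simp only [candLoop]
    rw [groupFind_take_none s (m + 1) hn
      (fun q hq hqm heq => absurd heq (Nat.ne_of_gt (h q hq hqm)))]
    exact ih (Nat.le_of_succ_le hn)
      (fun q hq hqm => Nat.lt_of_succ_lt (h q hq hqm))

-- candLoop finds the longest match
theorem candLoop_found (s : String) (p : String × String) (hp : p ∈ pvAll)
    (hm : PySem.Str.startswith s p.1 = true)
    (hmax : ∀ q ∈ pvAll, PySem.Str.startswith s q.1 = true →
              q.1.toList.length ≤ p.1.toList.length) :
    ∀ n, p.1.toList.length ≤ n → n ≤ s.toList.length → candLoop s n = some p.2 := by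
  intro n
  induction n with
  | zero =>
    intro hLn _
    exact absurd (Nat.le_trans (keys_nonempty p hp) hLn) (by omega)
  | succ m ih =>
    intro hLn hns
    simp only [candLoop]
    by_cases hEq : p.1.toList.length = m + 1
    · rw [← hEq, take_of_match s p.1 hm, groupFind_of_mem p (all_sub_pairs p hp)]
    · rw [groupFind_take_none s (m + 1) hns
        (fun q hq hqm h1 => by
          have := hmax q hq hqm
          exact hEq (Nat.le_antisymm hLn (h1 ▸ this)))]
      exact ih (by omega) (Nat.le_of_succ_le hns)

-- ===== VERDICT (by name: the statement is the Claim_ definition above) =====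
theorem categorize_resource_py_spec : Claim_equal_categorize_resource_py := by
  intro s _
  unfold Spec_categorize_resource_py categorize_resource_py categorize_resource_py_alt
  by_cases hex : ∃ p ∈ pvAll, PySem.Str.startswith s p.1 = true
  · obtain ⟨p, hpl, hpm, hmax⟩ := exists_max_match s pvAll hex
    have hu : ∀ q ∈ pvAll, PySem.Str.startswith s q.1 = true →
        q = p ∨ q.1.toList.length < p.1.toList.length := by
      intro q hq hqm
      rcases lt_or_eq_of_le (hmax q hq hqm) with hlt | heq
      · exact Or.inr hlt
      · exact Or.inl (key_inj hq hpl (eq_of_comparable_len (sw_comparable s q.1 p.1 hqm hpm) heq))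
    -- B returns the longest match p
    have hB : candLoop s (PySem.Str.len s).toNat = some p.2 := by
      rw [strlen_toNat]
      exact candLoop_found s p hpl hpm hmax s.toList.length
        (((sw_iff s p.1).mp hpm).length_le) (le_refl _)
    rw [hB]
    rcases List.mem_append.mp hpl with hpa | hpo
    · -- the longest match is an AWS prefix: A's first loop returns it
      have hA : catLoop s (PySem.List.sorted awsItems (fun x => -(PySem.Str.len x.1 : Int)) false)
          = some p.2 := by
        apply catLoop_max s _ p ((PySem.List.mem_sorted _ _ _ _).mpr hpa) hpm
        · exact (PySem.List.sorted_pairwise awsItems (fun x => -(PySem.Str.len x.1 : Int))).imp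
            (fun {a b} h => by rw [strlen_toList, strlen_toList] at h; omega)
        · intro q hq hqm
          exact hu q (List.mem_append_left _ ((PySem.List.mem_sorted _ _ _ _).mp hq)) hqm
      rw [hA]
    · -- the longest match is an other-provider prefix: no AWS prefix matches
      have hnoAws : catLoop s (PySem.List.sorted awsItems (fun x => -(PySem.Str.len x.1 : Int)) false)
          = none := by
        apply catLoop_none
        intro q hq hqm
        have hq' : q ∈ awsItems := (PySem.List.mem_sorted _ _ _ _).mp hq
        rcases sw_comparable s q.1 p.1 hqm hpm with h | h
        · exact (crossIncomp q hq' p hpo).1 h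
        · exact (crossIncomp q hq' p hpo).2 h
      have hOther : catLoop s otherItems = some p.2 := by
        apply catLoop_first s _ p hpo hpm
        intro q hq hqm
        by_cases hqp : q = p
        · exact hqp
        · have hinc := List.Pairwise.forall
            (fun _ _ h => ⟨h.2, h.1⟩) otherIncomp hq hpo hqp
          rcases sw_comparable s q.1 p.1 hqm hpm with h | h
          · exact absurd h hinc.1
          · exact absurd h hinc.2
      rw [hnoAws, hOther]
  · -- nothing matches: both return "Other"
    have hA1 : catLoop s (PySem.List.sorted awsItems (fun x => -(PySem.Str.len x.1 : Int)) false)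
        = none := by
      apply catLoop_none
      intro q hq hqm
      exact hex ⟨q, List.mem_append_left _ ((PySem.List.mem_sorted _ _ _ _).mp hq), hqm⟩
    have hA2 : catLoop s otherItems = none := by
      apply catLoop_none
      intro q hq hqm
      exact hex ⟨q, List.mem_append_right _ hq, hqm⟩
    have hB : candLoop s (PySem.Str.len s).toNat = none := by
      rw [strlen_toNat]
      exact candLoop_eq_none s s.toList.length (le_refl _)
        (fun q hq hqm => absurd ⟨q, hq, hqm⟩ hex)
    rw [hA1, hA2, hB]
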